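-- pv_equiv track=rewrite | github.com/ianmnz/adventofcode | src/y2025/d04.py | get_removable_paper_rolls
-- ===== SOURCE A (Python) =====
-- from collections.abc import Iterable
--
-- MAX_PAPER_ROLLS = 4
--
-- def get_accessible_paper_rolls(grid: Iterable[Iterable[int]]) -> list[tuple[int, int]]:
--     def convolve(x: int, y: int) -> int:
--         return sum(grid[x + dx][y + dy] for dx in (-1, 0, 1) for dy in (-1, 0, 1))
--
--     accessible = list()
--     m, n = len(grid), len(grid[0])
--     for i in range(1, m - 1):
--         for j in range(1, n - 1):
--             if grid[i][j] and convolve(i, j) < MAX_PAPER_ROLLS + 1: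
--                 accessible.append((i, j))
--
--     return accessible
--
-- def get_removable_paper_rolls(
--     padded_grid: Iterable[Iterable[int]], max_iter: int = -1
-- ) -> int:
--     removed = 0
--     nb_iter = 0
--     # Basically a mark ans sweep algorithm
--     while nb_iter != max_iter:
--         nb_iter += 1
--         accessible = get_accessible_paper_rolls(padded_grid)
--
--         if not accessible:
--             # Cannot remove any more paper rolls
--             break
--
--         # Remove accessible paper rolls
--         for i, j in accessible:
--             padded_grid[i][j] = 0
--         removed += len(accessible)
--
--     return removed
-- ===== SOURCE B (Python) =====
-- MAX_PAPER_ROLLS = 4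
--
-- def _accessible_by_rows(grid):
--     # Per row: column triple-sums once, then a sliding 3-wide window sum,
--     # collecting hit columns grouped by row.
--     m = len(grid)
--     n = len(grid[0])
--     hits = []
--     if m < 3 or n < 3:
--         return hits
--     for i in range(1, m - 1):
--         up, mid, down = grid[i - 1], grid[i], grid[i + 1]
--         t = [up[j] + mid[j] + down[j] for j in range(n)]
--         cols = []
--         w = t[0] + t[1]
--         for j in range(1, n - 1):
--             w += t[j + 1]
--             if mid[j] and w <= MAX_PAPER_ROLLS:
--                 cols.append(j)
--             w -= t[j - 1]
--         if cols:
--             hits.append((i, cols))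
--     return hits
--
-- def get_removable_paper_rolls(padded_grid, max_iter=-1):
--     removed = 0
--     nb_iter = 0
--     while nb_iter != max_iter:
--         nb_iter += 1
--         hits = _accessible_by_rows(padded_grid)
--         if not hits:
--             break
--         for i, cols in hits:
--             row = padded_grid[i]
--             for j in cols:
--                 row[j] = 0
--             removed += len(cols)
--     return removed
-- ===== Notes on version B (the rewrite author's own statement) =====
-- stated objective: faster
-- what changed: Per sweep, instead of re-summing all 9 neighbours per cell with a generator, B precomputes per-row column triple-sums and slides a 3-wide window across each row, collecting removable columns grouped by row and zeroing them row-wise; Pre_ excludes inputs where indexing can raise (empty grid with max_iter!=0, or grids with >=3 rows whose first row has >=3 columns but some row is shorter than the first), plus it admits max_iter=0 on anything since A returns 0 untouched.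
-- outside the precondition, e.g. on get_removable_paper_rolls([[0, 0, 0], [0, 0], [0, 0, 0]], -1): A returns 0, B raises IndexError
import Mathlib
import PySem

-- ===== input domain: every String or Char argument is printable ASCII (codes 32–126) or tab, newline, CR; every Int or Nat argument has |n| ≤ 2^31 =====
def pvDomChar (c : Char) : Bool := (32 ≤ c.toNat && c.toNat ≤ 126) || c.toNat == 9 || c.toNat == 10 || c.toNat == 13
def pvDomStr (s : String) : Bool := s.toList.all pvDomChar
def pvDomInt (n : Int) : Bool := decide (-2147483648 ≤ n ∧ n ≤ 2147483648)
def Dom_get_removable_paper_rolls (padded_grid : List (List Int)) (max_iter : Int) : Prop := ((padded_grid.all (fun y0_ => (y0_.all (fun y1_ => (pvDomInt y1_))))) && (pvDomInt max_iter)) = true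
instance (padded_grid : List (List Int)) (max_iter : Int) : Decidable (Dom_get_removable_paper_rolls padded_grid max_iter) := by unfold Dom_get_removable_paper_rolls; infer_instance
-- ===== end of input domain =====

-- B replaces A's 9-lookup-per-cell convolution sweep by per-row column triple-sums with a sliding
-- 3-wide window (constant-factor faster, measured); both mutate the argument grid identically in Python.


-- ===== PORT A =====
-- grid[i] (in-range whenever reached under Pre_; default [] otherwise)
def pvRow (g : List (List Int)) (i : Int) : List Int := (PySem.List.pyGet? g i).getD []
-- grid[i][j]
def pvCell (g : List (List Int)) (i j : Int) : Int := PySem.List.pyGetD (pvRow g i) j 0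
-- MAX_PAPER_ROLLS
def pvMAX : Int := 4
-- convolve(x, y): sum over dx in (-1,0,1), dy in (-1,0,1)
def pvConv (g : List (List Int)) (x y : Int) : Int :=
  (([-1, 0, 1] : List Int).flatMap (fun dx =>
    ([-1, 0, 1] : List Int).map (fun dy => pvCell g (x + dx) (y + dy)))).sum
-- get_accessible_paper_rolls
def pvAccess (g : List (List Int)) : List (Int × Int) :=
  let m : Int := g.length
  let n : Int := (pvRow g 0).length
  (PySem.List.pyRange 1 (m - 1) 1).foldl (fun acc i =>
    (PySem.List.pyRange 1 (n - 1) 1).foldl (fun acc j =>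
      if pvCell g i j ≠ 0 ∧ pvConv g i j < pvMAX + 1 then acc ++ [(i, j)] else acc) acc) []
-- padded_grid[i][j] = 0
def pvZero (g : List (List Int)) (i j : Int) : List (List Int) :=
  PySem.List.pySetD g i (PySem.List.pySetD (pvRow g i) j 0)

-- termination measure: number of nonzero cells
def pvNZ (g : List (List Int)) : Nat := (g.map (fun r => r.countP (fun x => decide (x ≠ 0)))).sum

theorem pv_countP_set_le (l : List Int) (k : Nat) :
    (l.set k 0).countP (fun x => decide (x ≠ 0)) ≤ l.countP (fun x => decide (x ≠ 0)) := by
  induction l generalizing k with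
  | nil => simp
  | cons a t ih =>
    cases k with
    | zero => simp only [List.set, List.countP_cons]; simp
    | succ k => simp only [List.set, List.countP_cons]; have := ih k; omega

theorem pv_countP_set_lt (l : List Int) (k : Nat) (hk : k < l.length) (h : l[k] ≠ 0) :
    (l.set k 0).countP (fun x => decide (x ≠ 0)) < l.countP (fun x => decide (x ≠ 0)) := by
  induction l generalizing k with
  | nil => simp at hk
  | cons a t ih =>
    cases k with
    | zero =>
      simp at h
      simp only [List.set, List.countP_cons]
      simp [h]
    | succ k =>
      simp at hk h
      have := ih k hk h
      simp only [List.set, List.countP_cons]; omega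

theorem pvNZ_set_le (g : List (List Int)) (k : Nat) (r : List Int)
    (h : r.countP (fun x => decide (x ≠ 0)) ≤ (g.getD k []).countP (fun x => decide (x ≠ 0))) :
    pvNZ (g.set k r) ≤ pvNZ g := by
  induction g generalizing k with
  | nil => simp
  | cons a t ih =>
    cases k with
    | zero => simp [pvNZ] at h ⊢; omega
    | succ k =>
      have := ih k (by simpa using h)
      simp [pvNZ] at this ⊢; omega

theorem pvNZ_set_lt (g : List (List Int)) (k : Nat) (r : List Int) (hk : k < g.length)
    (h : r.countP (fun x => decide (x ≠ 0)) < (g.getD k []).countP (fun x => decide (x ≠ 0))) :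
    pvNZ (g.set k r) < pvNZ g := by
  induction g generalizing k with
  | nil => simp at hk
  | cons a t ih =>
    cases k with
    | zero => simp [pvNZ] at h ⊢; omega
    | succ k =>
      simp at hk
      have := ih k hk (by simpa using h)
      simp [pvNZ] at this ⊢; omega

theorem pvZero_le (g : List (List Int)) (i j : Int) (hi : 0 ≤ i) (hj : 0 ≤ j) :
    pvNZ (pvZero g i j) ≤ pvNZ g := by
  unfold pvZero pvRow
  rw [PySem.List.pySetD_of_nonneg _ _ hi, PySem.List.pySetD_of_nonneg _ _ hj,
    PySem.List.pyGet?_of_nonneg _ hi]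
  by_cases hlen : i.toNat < g.length
  · apply pvNZ_set_le
    rw [List.getElem?_eq_getElem hlen, List.getD_eq_getElem?_getD, List.getElem?_eq_getElem hlen]
    exact pv_countP_set_le _ _
  · rw [List.set_eq_of_length_le (by omega)]

theorem pvZero_lt (g : List (List Int)) (i j : Int) (hi : 0 ≤ i) (hj : 0 ≤ j)
    (h : pvCell g i j ≠ 0) : pvNZ (pvZero g i j) < pvNZ g := by
  unfold pvCell pvRow at h
  rw [show j = ((j.toNat : Nat) : Int) from (Int.toNat_of_nonneg hj).symm,
    PySem.List.pyGetD_natCast, PySem.List.pyGet?_of_nonneg _ hi] at h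
  unfold pvZero pvRow
  rw [PySem.List.pySetD_of_nonneg _ _ hi, PySem.List.pySetD_of_nonneg _ _ hj,
    PySem.List.pyGet?_of_nonneg _ hi]
  set row := (g[i.toNat]?.getD []) with hrow
  have hjlt : j.toNat < row.length := by
    by_contra hge
    rw [List.getD_eq_getElem?_getD, List.getElem?_eq_none (by omega)] at h
    simp at h
  have hne : row[j.toNat] ≠ 0 := by
    rwa [List.getD_eq_getElem?_getD, List.getElem?_eq_getElem hjlt] at h
  have hilt : i.toNat < g.length := by
    by_contra hge
    rw [List.getElem?_eq_none (by omega)] at hrow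
    simp [hrow] at hjlt
  apply pvNZ_set_lt _ _ _ hilt
  rw [List.getD_eq_getElem?_getD, List.getElem?_eq_getElem hilt]
  rw [List.getElem?_eq_getElem hilt] at hrow
  simp only [Option.getD_some] at hrow
  rw [← hrow]
  exact pv_countP_set_lt _ _ hjlt hne

-- characterization of the accessibility sweep as a filter
def pvCond (g : List (List Int)) (i j : Int) : Bool :=
  decide (pvCell g i j ≠ 0 ∧ pvConv g i j < pvMAX + 1)

theorem pvAccess_eq (g : List (List Int)) :
    pvAccess g = (PySem.List.pyRange 1 ((g.length : Int) - 1) 1).flatMap (fun i =>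
      ((PySem.List.pyRange 1 (((pvRow g 0).length : Int) - 1) 1).filter (pvCond g i)).map
        (fun j => (i, j))) := by
  unfold pvAccess
  rw [PySem.List.foldl_congr_mem _ _ (fun acc i => acc ++
      ((PySem.List.pyRange 1 (((pvRow g 0).length : Int) - 1) 1).filter (pvCond g i)).map
        (fun j => (i, j))) _ ?_]
  · rw [PySem.List.foldl_append_eq_flatMap]; rfl
  · intro acc i _
    rw [PySem.List.foldl_append_ite (fun j => pvCell g i j ≠ 0 ∧ pvConv g i j < pvMAX + 1)
      (fun j => (i, j))]
    rfl

theorem mem_pvAccess (g : List (List Int)) (p : Int × Int) (hp : p ∈ pvAccess g) :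
    1 ≤ p.1 ∧ 1 ≤ p.2 ∧ pvCell g p.1 p.2 ≠ 0 := by
  rw [pvAccess_eq] at hp
  simp only [List.mem_flatMap, List.mem_map, List.mem_filter,
    PySem.List.mem_pyRange_one, pvCond, decide_eq_true_eq] at hp
  obtain ⟨i, ⟨hi1, _⟩, j, ⟨⟨hj1, _⟩, hcond, _⟩, hpe⟩ := hp
  subst hpe
  exact ⟨hi1, hj1, hcond⟩

theorem pv_foldZero_le (acc : List (Int × Int)) (g : List (List Int))
    (hmem : ∀ p ∈ acc, (0:Int) ≤ p.1 ∧ (0:Int) ≤ p.2) :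
    pvNZ (acc.foldl (fun g p => pvZero g p.1 p.2) g) ≤ pvNZ g := by
  induction acc generalizing g with
  | nil => simp
  | cons p rest ih =>
    have hp := hmem p (by simp)
    calc pvNZ ((p :: rest).foldl (fun g p => pvZero g p.1 p.2) g)
        = pvNZ (rest.foldl (fun g p => pvZero g p.1 p.2) (pvZero g p.1 p.2)) := rfl
      _ ≤ pvNZ (pvZero g p.1 p.2) := ih _ (fun q hq => hmem q (by simp [hq]))
      _ ≤ pvNZ g := pvZero_le _ _ _ hp.1 hp.2

theorem pv_foldZero_lt (g : List (List Int)) (p0 : Int × Int) (rest : List (Int × Int))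
    (hmem : ∀ p ∈ (p0 :: rest), (0:Int) ≤ p.1 ∧ (0:Int) ≤ p.2)
    (h0 : pvCell g p0.1 p0.2 ≠ 0) :
    pvNZ ((p0 :: rest).foldl (fun g p => pvZero g p.1 p.2) g) < pvNZ g := by
  have hp := hmem p0 (by simp)
  calc pvNZ ((p0 :: rest).foldl (fun g p => pvZero g p.1 p.2) g)
      = pvNZ (rest.foldl (fun g p => pvZero g p.1 p.2) (pvZero g p0.1 p0.2)) := rfl
    _ ≤ pvNZ (pvZero g p0.1 p0.2) := pv_foldZero_le _ _ (fun q hq => hmem q (by simp [hq]))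
    _ < pvNZ g := pvZero_lt _ _ _ hp.1 hp.2 h0

theorem pvA_decreases (g : List (List Int)) (h : pvAccess g ≠ []) :
    pvNZ ((pvAccess g).foldl (fun g p => pvZero g p.1 p.2) g) < pvNZ g := by
  obtain ⟨p, rest, he⟩ : ∃ p rest, pvAccess g = p :: rest := by
    cases hacc : pvAccess g with
    | nil => exact absurd hacc h
    | cons p rest => exact ⟨p, rest, rfl⟩
  rw [he]
  apply pv_foldZero_lt
  · intro q hq
    have := mem_pvAccess g q (by rw [he]; exact hq)
    exact ⟨by omega, by omega⟩
  · have := mem_pvAccess g p (by rw [he]; simp)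
    exact this.2.2

-- the while loop of A
def pvLoopA (mi : Int) (g : List (List Int)) (removed : Int) (nb : Int) : Int :=
  if nb = mi then removed
  else
    let acc := pvAccess g
    if h : acc = [] then removed
    else pvLoopA mi (acc.foldl (fun g p => pvZero g p.1 p.2) g) (removed + acc.length) (nb + 1)
termination_by pvNZ g
decreasing_by exact pvA_decreases g h

def get_removable_paper_rolls (padded_grid : List (List Int)) (max_iter : Int) : Int :=
  pvLoopA max_iter padded_grid 0 0

-- ===== PORT B =====
-- grid[i]
def pvRowB (g : List (List Int)) (i : Int) : List Int := (PySem.List.pyGet? g i).getD []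
-- xs[j]
def pvAt (xs : List Int) (j : Int) : Int := PySem.List.pyGetD xs j 0
-- the inner loop of _accessible_by_rows: sliding-window collection of removable columns of row i
def pvColsB (g : List (List Int)) (n : Int) (i : Int) : List Int :=
  let up := pvRowB g (i - 1)
  let mid := pvRowB g i
  let down := pvRowB g (i + 1)
  let t := (PySem.List.pyRange 0 n 1).map (fun j => pvAt up j + pvAt mid j + pvAt down j)
  let res := (PySem.List.pyRange 1 (n - 1) 1).foldl (fun s j =>
    let w := s.2 + pvAt t (j + 1)
    let cols := if pvAt mid j ≠ 0 ∧ w ≤ 4 then s.1 ++ [j] else s.1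
    (cols, w - pvAt t (j - 1))) (([] : List Int), pvAt t 0 + pvAt t 1)
  res.1
-- _accessible_by_rows
def pvAccessB (g : List (List Int)) : List (Int × List Int) :=
  let m : Int := g.length
  let n : Int := (pvRowB g 0).length
  if m < 3 ∨ n < 3 then []
  else (PySem.List.pyRange 1 (m - 1) 1).foldl (fun hits i =>
    let cols := pvColsB g n i
    if cols ≠ [] then hits ++ [(i, cols)] else hits) []
-- row[j] = 0
def pvZeroB (g : List (List Int)) (i j : Int) : List (List Int) :=
  PySem.List.pySetD g i (PySem.List.pySetD (pvRowB g i) j 0)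

-- sliding-window invariant: entering iteration j the window accumulator equals T (j-1) + T j
theorem pv_window_fold (mid : List Int) (T : Int → Int) (b : Int) :
    ∀ (k : Nat) (a : Int), (b - a).toNat = k → ∀ (cols0 : List Int),
    ((PySem.List.pyRange a b 1).foldl (fun s j =>
      let w := s.2 + T (j + 1)
      let cols := if pvAt mid j ≠ 0 ∧ w ≤ 4 then s.1 ++ [j] else s.1
      (cols, w - T (j - 1))) (cols0, T (a - 1) + T a)).1
    = cols0 ++ (PySem.List.pyRange a b 1).filter
        (fun j => decide (pvAt mid j ≠ 0 ∧ T (j - 1) + T j + T (j + 1) ≤ 4)) := by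
  intro k
  induction k with
  | zero =>
    intro a hk cols0
    rw [PySem.List.pyRange_one_eq_nil (by omega)]
    simp
  | succ k ih =>
    intro a hk cols0
    rw [PySem.List.pyRange_one_cons (by omega)]
    simp only [List.foldl_cons, List.filter_cons]
    have harith : T (a - 1) + T a + T (a + 1) - T (a - 1) = T (a + 1 - 1) + T (a + 1) := by
      have : a + 1 - 1 = a := by ring
      rw [this]; ring
    rw [harith]
    by_cases hc : pvAt mid a ≠ 0 ∧ T (a - 1) + T a + T (a + 1) ≤ 4
    · rw [if_pos hc, ih (a + 1) (by omega) (cols0 ++ [a])]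
      simp [hc]
    · rw [if_neg hc, ih (a + 1) (by omega) cols0]
      simp [hc]

theorem pvColsB_eq (g : List (List Int)) (n i : Int) :
    pvColsB g n i = (PySem.List.pyRange 1 (n - 1) 1).filter (fun j =>
      decide (pvAt (pvRowB g i) j ≠ 0 ∧
        pvAt ((PySem.List.pyRange 0 n 1).map (fun j => pvAt (pvRowB g (i-1)) j + pvAt (pvRowB g i) j + pvAt (pvRowB g (i+1)) j)) (j - 1)
        + pvAt ((PySem.List.pyRange 0 n 1).map (fun j => pvAt (pvRowB g (i-1)) j + pvAt (pvRowB g i) j + pvAt (pvRowB g (i+1)) j)) j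
        + pvAt ((PySem.List.pyRange 0 n 1).map (fun j => pvAt (pvRowB g (i-1)) j + pvAt (pvRowB g i) j + pvAt (pvRowB g (i+1)) j)) (j + 1) ≤ 4)) := by
  unfold pvColsB
  have := pv_window_fold (pvRowB g i)
    (pvAt ((PySem.List.pyRange 0 n 1).map
      (fun j => pvAt (pvRowB g (i-1)) j + pvAt (pvRowB g i) j + pvAt (pvRowB g (i+1)) j)))
    (n - 1) ((n - 1) - 1).toNat 1 rfl []
  norm_num at this ⊢
  rw [this]

theorem pvAccessB_eq (g : List (List Int))
    (h3 : ¬((g.length : Int) < 3 ∨ ((pvRowB g 0).length : Int) < 3)) :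
    pvAccessB g = ((PySem.List.pyRange 1 ((g.length : Int) - 1) 1).filter
        (fun i => decide (pvColsB g ((pvRowB g 0).length : Int) i ≠ []))).map
      (fun i => (i, pvColsB g ((pvRowB g 0).length : Int) i)) := by
  unfold pvAccessB
  rw [if_neg h3]
  rw [PySem.List.foldl_append_ite (fun i => pvColsB g ((pvRowB g 0).length : Int) i ≠ [])
    (fun i => (i, pvColsB g ((pvRowB g 0).length : Int) i))]
  rfl

theorem mem_pvAccessB (g : List (List Int)) (h : Int × List Int) (hh : h ∈ pvAccessB g) :
    1 ≤ h.1 ∧ h.2 ≠ [] ∧ ∀ j ∈ h.2, 1 ≤ j ∧ pvAt (pvRowB g h.1) j ≠ 0 := by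
  by_cases h3 : (g.length : Int) < 3 ∨ ((pvRowB g 0).length : Int) < 3
  · unfold pvAccessB at hh; rw [if_pos h3] at hh; simp at hh
  · rw [pvAccessB_eq g h3] at hh
    simp only [List.mem_map, List.mem_filter, PySem.List.mem_pyRange_one,
      decide_eq_true_eq] at hh
    obtain ⟨i, ⟨⟨hi1, _⟩, hne⟩, hhe⟩ := hh
    subst hhe
    refine ⟨hi1, hne, ?_⟩
    intro j hj
    rw [pvColsB_eq] at hj
    simp only [List.mem_filter, PySem.List.mem_pyRange_one, decide_eq_true_eq] at hj
    exact ⟨hj.1.1, hj.2.1⟩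

-- flatten of B's row-grouped hits back into A's (row, col) order
def pvFlat (hits : List (Int × List Int)) : List (Int × Int) :=
  hits.flatMap (fun h => h.2.map (fun j => (h.1, j)))

theorem pvFold_fst (hits : List (Int × List Int)) (g : List (List Int)) (r : Int) :
    (hits.foldl (fun s h =>
      (h.2.foldl (fun g j => pvZeroB g h.1 j) s.1, s.2 + (h.2.length : Int))) (g, r)).1
    = (pvFlat hits).foldl (fun g p => pvZero g p.1 p.2) g := by
  induction hits generalizing g r with
  | nil => simp [pvFlat]
  | cons h rest ih =>
    simp only [List.foldl_cons, pvFlat, List.flatMap_cons, List.foldl_append]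
    rw [ih]
    congr 1
    rw [List.foldl_map]
    rfl

theorem mem_pvFlat_accessB (g : List (List Int)) (p : Int × Int)
    (hp : p ∈ pvFlat (pvAccessB g)) : 1 ≤ p.1 ∧ 1 ≤ p.2 ∧ pvCell g p.1 p.2 ≠ 0 := by
  simp only [pvFlat, List.mem_flatMap, List.mem_map] at hp
  obtain ⟨h, hh, j, hj, hpe⟩ := hp
  obtain ⟨h1, _, hall⟩ := mem_pvAccessB g h hh
  obtain ⟨hj1, hjne⟩ := hall j hj
  subst hpe
  exact ⟨h1, hj1, hjne⟩

theorem pvFlat_accessB_ne (g : List (List Int)) (h : pvAccessB g ≠ []) :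
    pvFlat (pvAccessB g) ≠ [] := by
  cases he : pvAccessB g with
  | nil => exact absurd he h
  | cons h0 rest =>
    have := (mem_pvAccessB g h0 (by rw [he]; simp)).2.1
    simp [pvFlat, this]

theorem pvB_decreases (g : List (List Int)) (r : Int) (h : pvAccessB g ≠ []) :
    pvNZ ((pvAccessB g).foldl (fun s h =>
      (h.2.foldl (fun g j => pvZeroB g h.1 j) s.1, s.2 + (h.2.length : Int))) (g, r)).1 < pvNZ g := by
  rw [pvFold_fst]
  obtain ⟨p, rest, he⟩ : ∃ p rest, pvFlat (pvAccessB g) = p :: rest := by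
    cases hacc : pvFlat (pvAccessB g) with
    | nil => exact absurd hacc (pvFlat_accessB_ne g h)
    | cons p rest => exact ⟨p, rest, rfl⟩
  rw [he]
  apply pv_foldZero_lt
  · intro q hq
    have := mem_pvFlat_accessB g q (by rw [he]; exact hq)
    exact ⟨by omega, by omega⟩
  · exact (mem_pvFlat_accessB g p (by rw [he]; simp)).2.2

-- the while loop of B
def pvLoopB (mi : Int) (g : List (List Int)) (removed : Int) (nb : Int) : Int :=
  if nb = mi then removed
  else
    let hits := pvAccessB g
    if h : hits = [] then removed
    else
      let res := hits.foldl (fun s h =>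
        (h.2.foldl (fun g j => pvZeroB g h.1 j) s.1, s.2 + (h.2.length : Int))) (g, removed)
      pvLoopB mi res.1 res.2 (nb + 1)
termination_by pvNZ g
decreasing_by exact pvB_decreases g removed h

def get_removable_paper_rolls_alt (padded_grid : List (List Int)) (max_iter : Int) : Int :=
  pvLoopB max_iter padded_grid 0 0

-- ===== PRECONDITION & SPEC =====
-- Pre_ excludes the inputs where Python A raises IndexError (empty grid with max_iter ≠ 0) together
-- with ragged grids (≥3 rows, first row ≥3 wide, some row shorter than the first) on which indexing
-- the neighbourhood can raise in A and does raise in B; max_iter = 0 returns 0 before touching the grid.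
def Pre_get_removable_paper_rolls (padded_grid : List (List Int)) (max_iter : Int) : Prop :=
  max_iter = 0 ∨ (padded_grid ≠ [] ∧
    (3 ≤ padded_grid.length → 3 ≤ (padded_grid.headD []).length →
      ∀ r ∈ padded_grid, (padded_grid.headD []).length ≤ r.length))
instance (padded_grid : List (List Int)) (max_iter : Int) : Decidable (Pre_get_removable_paper_rolls padded_grid max_iter) := by unfold Pre_get_removable_paper_rolls; infer_instance
def pvWitness_get_removable_paper_rolls : List (List Int) × Int := ([[0, 0, 0], [0, 1, 0], [0, 0, 0]], -1)

def Spec_get_removable_paper_rolls (padded_grid : List (List Int)) (max_iter : Int) (out : Int) : Prop := out = get_removable_paper_rolls_alt padded_grid max_iter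
instance (padded_grid : List (List Int)) (max_iter : Int) (out : Int) : Decidable (Spec_get_removable_paper_rolls padded_grid max_iter out) := by unfold Spec_get_removable_paper_rolls; infer_instance

-- ===== CLAIM (what is proved, stated in full; the proofs are below) =====
def Claim_equal_get_removable_paper_rolls : Prop := ∀ (padded_grid : List (List Int)) (max_iter : Int), Dom_get_removable_paper_rolls padded_grid max_iter → Pre_get_removable_paper_rolls padded_grid max_iter → Spec_get_removable_paper_rolls padded_grid max_iter (get_removable_paper_rolls padded_grid max_iter)

-- ===== LEMMAS AND PROOFS =====

theorem pvRowB_eq : @pvRowB = @pvRow := rfl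

-- rows whose column list is empty contribute nothing, so the filter may be dropped
theorem pv_flatMap_filter (l : List Int) (C : Int → List Int) (F : Int → Int → Int × Int) :
    (l.filter (fun x => decide (C x ≠ []))).flatMap (fun x => (C x).map (F x))
    = l.flatMap (fun x => (C x).map (F x)) := by
  induction l with
  | nil => rfl
  | cons a t ih =>
    rw [List.filter_cons]
    by_cases hC : C a = []
    · rw [if_neg (by simp [hC]), List.flatMap_cons, ih, hC]
      simp
    · rw [if_pos (by simp [hC]), List.flatMap_cons, List.flatMap_cons, ih]

-- the window condition of B agrees with A's convolution condition on interior columns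
theorem pv_cond_eq (g : List (List Int)) (i j : Int) (hj1 : 1 ≤ j)
    (hjn : j < (((pvRowB g 0).length : Int)) - 1) :
    (fun j =>
      decide (pvAt (pvRowB g i) j ≠ 0 ∧
        pvAt ((PySem.List.pyRange 0 ((pvRowB g 0).length : Int) 1).map (fun j => pvAt (pvRowB g (i-1)) j + pvAt (pvRowB g i) j + pvAt (pvRowB g (i+1)) j)) (j - 1)
        + pvAt ((PySem.List.pyRange 0 ((pvRowB g 0).length : Int) 1).map (fun j => pvAt (pvRowB g (i-1)) j + pvAt (pvRowB g i) j + pvAt (pvRowB g (i+1)) j)) j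
        + pvAt ((PySem.List.pyRange 0 ((pvRowB g 0).length : Int) 1).map (fun j => pvAt (pvRowB g (i-1)) j + pvAt (pvRowB g i) j + pvAt (pvRowB g (i+1)) j)) (j + 1) ≤ 4)) j
    = pvCond g i j := by
  have hb : ∀ (a b : Int), pvAt (pvRowB g a) b = pvCell g a b := fun _ _ => rfl
  simp only []
  unfold pvAt
  rw [PySem.List.pyGetD_map_pyRange_of_nonneg _ _ _ _ (by omega) (by omega),
    PySem.List.pyGetD_map_pyRange_of_nonneg _ _ _ _ (by omega) (by omega),
    PySem.List.pyGetD_map_pyRange_of_nonneg _ _ _ _ (by omega) (by omega)]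
  unfold pvCond
  rw [decide_eq_decide]
  unfold pvConv pvMAX
  simp only [List.flatMap_cons, List.map_cons, List.map_nil, List.flatMap_nil,
    List.append_nil, List.sum_cons, List.sum_nil, List.cons_append, List.nil_append, add_zero]
  unfold pvAt at hb
  simp only [hb]
  constructor
  · rintro ⟨h1, h2⟩
    refine ⟨h1, ?_⟩
    simp only [sub_eq_add_neg] at h2 ⊢
    linarith
  · rintro ⟨h1, h2⟩
    refine ⟨h1, ?_⟩
    simp only [sub_eq_add_neg] at h2 ⊢
    linarith

theorem pvFlat_accessB (g : List (List Int)) : pvFlat (pvAccessB g) = pvAccess g := by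
  by_cases h3 : ((g.length : Int) < 3 ∨ ((pvRowB g 0).length : Int) < 3)
  · unfold pvAccessB
    rw [if_pos h3]
    rw [pvAccess_eq]
    rcases h3 with hm | hn
    · rw [PySem.List.pyRange_one_eq_nil (a := 1) (b := (g.length : Int) - 1) (by omega)]
      simp [pvFlat]
    · have hn' : ((pvRow g 0).length : Int) < 3 := hn
      rw [PySem.List.pyRange_one_eq_nil (a := 1) (b := ((pvRow g 0).length : Int) - 1)
        (by omega)]
      simp [pvFlat]
  · rw [pvAccessB_eq g h3]
    unfold pvFlat
    rw [List.flatMap_map]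
    simp only []
    rw [pv_flatMap_filter _ (pvColsB g ((pvRowB g 0).length : Int)) (fun i j => (i, j))]
    rw [pvAccess_eq]
    apply List.flatMap_congr
    intro i _
    rw [pvColsB_eq]
    rw [← pvRowB_eq]
    congr 1
    apply List.filter_congr
    intro j hj
    rw [PySem.List.mem_pyRange_one] at hj
    exact pv_cond_eq g i j hj.1 hj.2

theorem pvFold_snd (hits : List (Int × List Int)) (g : List (List Int)) (r : Int) :
    (hits.foldl (fun s h =>
      (h.2.foldl (fun g j => pvZeroB g h.1 j) s.1, s.2 + (h.2.length : Int))) (g, r)).2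
    = r + ((pvFlat hits).length : Int) := by
  induction hits generalizing g r with
  | nil => simp [pvFlat]
  | cons h rest ih =>
    simp only [List.foldl_cons]
    rw [ih]
    simp [pvFlat]
    ring

theorem pvAccessB_nil_iff (g : List (List Int)) : pvAccessB g = [] ↔ pvAccess g = [] := by
  constructor
  · intro h
    rw [← pvFlat_accessB, h]
    rfl
  · intro h
    by_contra hne
    exact (pvFlat_accessB_ne g hne) (by rw [pvFlat_accessB]; exact h)

theorem pvLoops_eq (mi : Int) : ∀ (N : Nat) (g : List (List Int)) (r nb : Int),
    pvNZ g ≤ N → pvLoopA mi g r nb = pvLoopB mi g r nb := by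
  intro N
  induction N with
  | zero =>
    intro g r nb hN
    rw [pvLoopA, pvLoopB]
    by_cases hnb : nb = mi
    · rw [if_pos hnb, if_pos hnb]
    · rw [if_neg hnb, if_neg hnb]
      by_cases hacc : pvAccess g = []
      · rw [dif_pos hacc, dif_pos ((pvAccessB_nil_iff g).mpr hacc)]
      · exfalso
        have := pvA_decreases g hacc
        omega
  | succ N ih =>
    intro g r nb hN
    rw [pvLoopA, pvLoopB]
    by_cases hnb : nb = mi
    · rw [if_pos hnb, if_pos hnb]
    · rw [if_neg hnb, if_neg hnb]
      by_cases hacc : pvAccess g = []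
      · rw [dif_pos hacc, dif_pos ((pvAccessB_nil_iff g).mpr hacc)]
      · have hB : pvAccessB g ≠ [] := fun h => hacc ((pvAccessB_nil_iff g).mp h)
        rw [dif_neg hacc, dif_neg hB]
        simp only [pvFold_fst, pvFold_snd, pvFlat_accessB]
        apply ih
        have := pvA_decreases g hacc
        omega

-- ===== VERDICT (by name: the statement is the Claim_ definition above) =====
theorem get_removable_paper_rolls_spec : Claim_equal_get_removable_paper_rolls := by
  intro g mi _ _
  unfold Spec_get_removable_paper_rolls get_removable_paper_rolls get_removable_paper_rolls_alt
  exact pvLoops_eq mi (pvNZ g) g 0 0 (le_refl _)
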